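-- pv_equiv track=rewrite | github.com/sarbeshtiwari/arc-agi-3 | environment_files/tg01/tg01.py | _zone_quad
-- ===== SOURCE A (Python) =====
-- from typing import Any, Dict, List, Optional, Set, Tuple
--
-- GRID_ROWS = 20
--
-- GRID_COLS = 20
--
-- def _zone_quad(
--     row_split: int, col_split: int, tl: int, tr: int, bl: int, br: int
-- ) -> List[List[int]]:
--     return [
--         [
--             tl
--             if r < row_split and c < col_split
--             else tr
--             if r < row_split
--             else bl
--             if c < col_split
--             else br
--             for c in range(GRID_COLS)
--         ]
--         for r in range(GRID_ROWS)
--     ]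
-- ===== SOURCE B (Python) =====
-- from typing import List
--
-- GRID_ROWS = 20
-- GRID_COLS = 20
--
-- def _zone_quad(
--     row_split: int, col_split: int, tl: int, tr: int, bl: int, br: int
-- ) -> List[List[int]]:
--     rs = min(max(row_split, 0), GRID_ROWS)
--     cs = min(max(col_split, 0), GRID_COLS)
--     top = [tl] * cs + [tr] * (GRID_COLS - cs)
--     bottom = [bl] * cs + [br] * (GRID_COLS - cs)
--     return [list(top) for _ in range(rs)] + [list(bottom) for _ in range(GRID_ROWS - rs)]
-- ===== Notes on version B (the rewrite author's own statement) =====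
-- stated objective: simpler
-- what changed: Replaces the per-cell quadrant ternary over a 20x20 comprehension with two precomputed row templates built by list repetition, clamped splits, and concatenation of row copies.
import Mathlib
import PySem

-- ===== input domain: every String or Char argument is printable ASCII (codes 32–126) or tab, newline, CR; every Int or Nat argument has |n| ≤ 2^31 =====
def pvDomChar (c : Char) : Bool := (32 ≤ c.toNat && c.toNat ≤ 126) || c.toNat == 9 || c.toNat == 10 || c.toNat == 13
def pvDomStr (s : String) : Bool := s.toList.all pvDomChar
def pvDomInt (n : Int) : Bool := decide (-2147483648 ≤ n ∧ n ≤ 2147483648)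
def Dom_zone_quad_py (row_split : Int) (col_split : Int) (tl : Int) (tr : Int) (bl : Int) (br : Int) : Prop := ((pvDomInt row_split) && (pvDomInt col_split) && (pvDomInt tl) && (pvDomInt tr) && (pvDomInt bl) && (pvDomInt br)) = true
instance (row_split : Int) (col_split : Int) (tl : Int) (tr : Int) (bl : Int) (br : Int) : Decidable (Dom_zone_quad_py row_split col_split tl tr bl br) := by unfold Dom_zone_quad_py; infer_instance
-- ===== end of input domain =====

-- B replaces the per-cell quadrant ternary with clamped splits and two precomputed
-- row templates built by replication and concatenation (objective: simpler).


-- ===== PORT A =====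
-- literal transliteration of the nested comprehension with the per-cell chained ternary
def zone_quad_py (row_split : Int) (col_split : Int) (tl : Int) (tr : Int) (bl : Int) (br : Int) : List (List Int) :=
  (PySem.List.pyRange 0 20 1).map (fun r =>
    (PySem.List.pyRange 0 20 1).map (fun c =>
      if r < row_split ∧ c < col_split then tl
      else if r < row_split then tr
      else if c < col_split then bl
      else br))

-- ===== PORT B =====
-- clamp the splits, build two row templates by repetition, concatenate row copies
def zone_quad_py_alt (row_split : Int) (col_split : Int) (tl : Int) (tr : Int) (bl : Int) (br : Int) : List (List Int) :=
  let rs := min (max row_split 0) 20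
  let cs := min (max col_split 0) 20
  let top := List.replicate cs.toNat tl ++ List.replicate (20 - cs).toNat tr
  let bottom := List.replicate cs.toNat bl ++ List.replicate (20 - cs).toNat br
  List.replicate rs.toNat top ++ List.replicate (20 - rs).toNat bottom

-- ===== PRECONDITION & SPEC =====
def Spec_zone_quad_py (row_split : Int) (col_split : Int) (tl : Int) (tr : Int) (bl : Int) (br : Int) (out : List (List Int)) : Prop := out = zone_quad_py_alt row_split col_split tl tr bl br
instance (row_split : Int) (col_split : Int) (tl : Int) (tr : Int) (bl : Int) (br : Int) (out : List (List Int)) : Decidable (Spec_zone_quad_py row_split col_split tl tr bl br out) := by unfold Spec_zone_quad_py; infer_instance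

-- ===== CLAIM (what is proved, stated in full; the proofs are below) =====
def Claim_equal_zone_quad_py : Prop := ∀ (row_split : Int) (col_split : Int) (tl : Int) (tr : Int) (bl : Int) (br : Int), Dom_zone_quad_py row_split col_split tl tr bl br → Spec_zone_quad_py row_split col_split tl tr bl br (zone_quad_py row_split col_split tl tr bl br)

-- ===== LEMMAS AND PROOFS =====

-- a replicate-append list indexes as an if
theorem getElem_replicate_append {α : Type} (m n i : ℕ) (x y : α)
    (h : i < (List.replicate m x ++ List.replicate n y).length) :
    (List.replicate m x ++ List.replicate n y)[i] = if i < m then x else y := by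
  by_cases hi : i < m
  · rw [List.getElem_append_left (by simpa using hi)]
    simp [hi]
  · rw [List.getElem_append_right (by simpa using hi)]
    simp [hi]

-- mapping a threshold-if over range(20) yields the clamped replicate-append template
theorem pyRange20_map_if {α : Type} (k : Int) (x y : α) :
    (PySem.List.pyRange 0 20 1).map (fun c => if c < k then x else y)
    = List.replicate (min (max k 0) 20).toNat x ++ List.replicate ((20 : Int) - min (max k 0) 20).toNat y := by
  apply List.ext_getElem
  · simp [PySem.List.length_pyRange_one]
    omega
  · intro i h1 h2
    rw [List.getElem_map, PySem.List.getElem_pyRange_one, getElem_replicate_append]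
    have hi : i < 20 := by
      have := h1
      rw [List.length_map, PySem.List.length_pyRange_one] at this
      omega
    split_ifs with ha hb hb <;> first | rfl | (exfalso; omega)

theorem zone_quad_eq (row_split col_split tl tr bl br : Int) :
    zone_quad_py row_split col_split tl tr bl br = zone_quad_py_alt row_split col_split tl tr bl br := by
  unfold zone_quad_py zone_quad_py_alt
  have hrow : ∀ r ∈ PySem.List.pyRange 0 20 1,
      ((PySem.List.pyRange 0 20 1).map (fun c =>
        if r < row_split ∧ c < col_split then tl
        else if r < row_split then tr
        else if c < col_split then bl
        else br))
      = if r < row_split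
        then (PySem.List.pyRange 0 20 1).map (fun c => if c < col_split then tl else tr)
        else (PySem.List.pyRange 0 20 1).map (fun c => if c < col_split then bl else br) := by
    intro r _
    by_cases hr : r < row_split <;> simp [hr]
  rw [List.map_congr_left hrow, pyRange20_map_if row_split, pyRange20_map_if col_split,
      pyRange20_map_if col_split]

-- ===== VERDICT (by name: the statement is the Claim_ definition above) =====
theorem zone_quad_py_spec : Claim_equal_zone_quad_py := by
  intro row_split col_split tl tr bl br _
  exact zone_quad_eq row_split col_split tl tr bl br
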